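-- pv_equiv track=rewrite | github.com/sooooooongyi/algorithm | programmers/lv0/옹알이1.py | solution
-- ===== SOURCE A (Python) =====
-- from itertools import permutations
--
-- def solution(babbling):
--     word = []
--     answer = 0
--     speek = ["aya","ye","woo","ma"]
--     for i in range(1, len(speek)+1):
--         for j in permutations(speek, i):
--             word.append(''.join(j))
--
--     for i in babbling:
--         if i in word:
--             answer += 1
--     return answer
-- ===== SOURCE B (Python) =====
-- def solution(babbling):
--     sounds = ["aya", "ye", "woo", "ma"]
--
--     def ok(s, avail):
--         # s parses as a concatenation of distinct sounds from avail (each at most once)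
--         if not s:
--             return True
--         for k in range(len(avail)):
--             w = avail[k]
--             if s.startswith(w) and ok(s[len(w):], avail[:k] + avail[k+1:]):
--                 return True
--         return False
--
--     return sum(1 for s in babbling if s and ok(s, sounds))
-- ===== Notes on version B (the rewrite author's own statement) =====
-- stated objective: alternative
-- what changed: Replaced the precomputed 64-entry permutation lookup table with a direct backtracking parser that consumes each babbling word sound by sound, using each sound at most once.
import Mathlib
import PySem

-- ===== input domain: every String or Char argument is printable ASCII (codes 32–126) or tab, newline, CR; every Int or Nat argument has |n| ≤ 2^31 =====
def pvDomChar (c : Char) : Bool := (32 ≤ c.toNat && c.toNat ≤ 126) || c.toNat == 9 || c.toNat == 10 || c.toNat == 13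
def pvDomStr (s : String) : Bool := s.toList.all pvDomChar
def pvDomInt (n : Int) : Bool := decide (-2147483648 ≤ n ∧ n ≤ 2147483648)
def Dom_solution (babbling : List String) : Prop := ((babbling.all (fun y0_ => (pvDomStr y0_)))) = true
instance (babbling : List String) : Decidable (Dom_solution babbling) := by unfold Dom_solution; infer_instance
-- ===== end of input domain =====

-- B replaces A's precomputed 64-entry permutation lookup table with a direct
-- backtracking parser per word (alternative decomposition, same results).

-- ===== PORT A =====
-- itertools.permutations(xs, r) for a list xs of DISTINCT elements, in itertools
-- order: for each x of xs in order, x followed by each (r-1)-permutation of the rest.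
def pyPerms (xs : List String) : Nat → List (List String)
  | 0 => [[]]
  | r + 1 => xs.flatMap (fun x => (pyPerms (xs.erase x) r).map (fun j => x :: j))

def solution (babbling : List String) : Int :=
  let speek : List String := ["aya", "ye", "woo", "ma"]
  -- for i in range(1, len(speek)+1): for j in permutations(speek, i): word.append(''.join(j))
  let word : List String :=
    (PySem.List.pyRange 1 (speek.length + 1) 1).foldl
      (fun w i => w ++ (pyPerms speek i.toNat).map (fun j => String.join j)) []
  -- for i in babbling: if i in word: answer += 1
  babbling.foldl (fun answer i => if word.contains i then answer + 1 else answer) 0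

-- ===== PORT B =====
-- ok(s, avail): try each still-available sound (by position) as a prefix of s, recurse
-- on the rest of s with that sound removed; the empty remainder parses.
def okB (avail : List String) (cs : List Char) : Bool :=
  if cs.isEmpty then true
  else
    (List.range avail.length).attach.any (fun ⟨k, hk⟩ =>
      let w := avail.getD k ""
      w.toList.isPrefixOf cs && okB (avail.eraseIdx k) (cs.drop w.toList.length))
termination_by avail.length
decreasing_by
  simp only [List.mem_range] at hk
  simp [List.length_eraseIdx, hk]; omega

def solution_alt (babbling : List String) : Int :=
  let sounds : List String := ["aya", "ye", "woo", "ma"]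
  (babbling.map (fun s => if !s.isEmpty && okB sounds s.toList then (1 : Int) else 0)).sum

-- ===== PRECONDITION & SPEC =====
def Spec_solution (babbling : List String) (out : Int) : Prop := out = solution_alt babbling
instance (babbling : List String) (out : Int) : Decidable (Spec_solution babbling out) := by unfold Spec_solution; infer_instance

-- ===== CLAIM (what is proved, stated in full; the proofs are below) =====
def Claim_equal_solution : Prop := ∀ (babbling : List String), Dom_solution babbling → Spec_solution babbling (solution babbling)

-- ===== LEMMAS AND PROOFS =====

-- the language accepted by okB avail, as an explicit (fuel-indexed, kernel-computable)
-- list of char lists; fuel ≥ avail.length suffices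
def Jc : Nat → List String → List (List Char)
  | 0, _ => [[]]
  | f + 1, avail => [] :: (List.range avail.length).flatMap (fun k =>
      (Jc f (avail.eraseIdx k)).map (fun t => (avail.getD k "").toList ++ t))

theorem prefix_drop_iff (p cs t : List Char) :
    (p.isPrefixOf cs = true ∧ cs.drop p.length = t) ↔ cs = p ++ t := by
  constructor
  · rintro ⟨h1, rfl⟩
    obtain ⟨u, rfl⟩ := List.isPrefixOf_iff_prefix.mp h1
    simp
  · rintro rfl
    refine ⟨List.isPrefixOf_iff_prefix.mpr ⟨t, rfl⟩, ?_⟩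
    simp

theorem okB_iff_mem (f : Nat) :
    ∀ (avail : List String) (cs : List Char), avail.length ≤ f →
      (okB avail cs = true ↔ cs ∈ Jc f avail) := by
  induction f with
  | zero =>
    intro avail cs hlen
    have : avail = [] := List.length_eq_zero_iff.mp (Nat.le_zero.mp hlen)
    subst this
    rw [okB]
    cases cs <;> simp [Jc]
  | succ f ih =>
    intro avail cs hlen
    rw [okB]
    by_cases hc : cs.isEmpty
    · simp [Jc, List.isEmpty_iff.mp hc]
    · have hcs : cs ≠ [] := by simpa [List.isEmpty_iff] using hc
      simp only [if_neg hc, List.any_eq_true, List.mem_attach, true_and, Subtype.exists,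
        Jc, List.mem_cons, List.mem_flatMap, List.mem_map, Bool.and_eq_true, List.mem_range]
      constructor
      · rintro ⟨k, hk, hpre, hok⟩
        have hk' : k ∈ List.range avail.length := List.mem_range.mpr hk
        have hlen' : (avail.eraseIdx k).length ≤ f := by
          simp [List.length_eraseIdx, hk]; omega
        refine Or.inr ⟨k, hk, cs.drop ((avail.getD k "").toList.length), ?_, ?_⟩
        · exact (ih _ _ hlen').mp hok
        · exact ((prefix_drop_iff _ _ _).mp ⟨hpre, rfl⟩).symm
      · rintro (rfl | ⟨k, hk, t, ht, heq⟩)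
        · exact absurd rfl hcs
        · have hsp := (prefix_drop_iff (avail.getD k "").toList cs t).mpr heq.symm
          have hlen' : (avail.eraseIdx k).length ≤ f := by
            simp [List.length_eraseIdx, hk]; omega
          exact ⟨k, hk, hsp.1, (ih _ _ hlen').mpr (hsp.2 ▸ ht)⟩

-- the concrete word list that A builds
def wordA : List String :=
  (PySem.List.pyRange 1 5 1).foldl
    (fun w i => w ++ (pyPerms ["aya", "ye", "woo", "ma"] i.toNat).map (fun j => String.join j)) []

theorem wordA_sub : ∀ w ∈ wordA, w.toList ≠ [] ∧ w.toList ∈ Jc 4 ["aya", "ye", "woo", "ma"] := by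
  decide

set_option maxRecDepth 10000 in
theorem Jc_sub : ∀ cs ∈ Jc 4 ["aya", "ye", "woo", "ma"], cs = [] ∨ ∃ w ∈ wordA, w.toList = cs := by
  decide

theorem per_string (s : String) :
    wordA.contains s = (!s.isEmpty && okB ["aya", "ye", "woo", "ma"] s.toList) := by
  by_cases hs : s ∈ wordA
  · obtain ⟨hne, hmem⟩ := wordA_sub s hs
    have hok : okB ["aya", "ye", "woo", "ma"] s.toList = true :=
      (okB_iff_mem 4 _ _ (by simp)).mpr hmem
    have hse : s.isEmpty = false := by
      rcases he : s.isEmpty with _ | _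
      · rfl
      · exact absurd (by simp [String.isEmpty_iff.mp he]) hne
    simp [List.contains_iff_mem, hs, hse, hok]
  · have hcf : wordA.contains s = false := by
      simpa [List.contains_iff_mem] using hs
    rw [hcf]
    rcases he : s.isEmpty with _ | _
    · rcases hok : okB ["aya", "ye", "woo", "ma"] s.toList with _ | _
      · simp
      · have hmem := (okB_iff_mem 4 _ _ (by simp)).mp hok
        rcases Jc_sub _ hmem with hnil | ⟨w, hw, hwt⟩
        · have hse : s = "" := String.toList_inj.mp (by simp [hnil])
          exact absurd (hse ▸ he) (by decide)
        · exact absurd (String.toList_inj.mp hwt ▸ hw) hs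
    · simp [he]

theorem foldl_count (p q : String → Bool) (hpq : ∀ s, p s = q s)
    (l : List String) (acc : Int) :
    l.foldl (fun a s => if p s then a + 1 else a) acc
      = acc + (l.map (fun s => if q s then (1 : Int) else 0)).sum := by
  induction l generalizing acc with
  | nil => simp
  | cons x xs ih =>
    simp only [List.foldl_cons, List.map_cons, List.sum_cons, hpq x]
    rcases hq : q x with _ | _ <;> simp [hq, ih] <;> ring

theorem solution_eq_alt (babbling : List String) :
    solution babbling = solution_alt babbling := by
  show babbling.foldl (fun answer i => if wordA.contains i then answer + 1 else answer) 0
      = solution_alt babbling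
  rw [foldl_count (fun i => wordA.contains i)
      (fun s => !s.isEmpty && okB ["aya", "ye", "woo", "ma"] s.toList) per_string babbling 0]
  simp [solution_alt]

-- ===== VERDICT (by name: the statement is the Claim_ definition above) =====
theorem solution_spec : Claim_equal_solution := by
  intro babbling _
  exact solution_eq_alt babbling
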